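-- pv_equiv track=rewrite | github.com/djkostyan4ik/pp1 | 12-Test3/mock 3.1/p7.py | f
-- ===== SOURCE A (Python) =====
-- def f(arr2D):
--     column_sums = {}
--     for row in arr2D:
--         for index, value in enumerate(row):
--             if index in column_sums:
--                 column_sums[index] += value
--             else:
--                 column_sums[index] = value
--     for sum_val in column_sums.values():
--         if list(column_sums.values()).count(sum_val) >= 2:
--             return True
--     return False
-- ===== SOURCE B (Python) =====
-- def f(arr2D):
--     sums = []
--     for row in arr2D:
--         sums = [(sums[i] if i < len(sums) else 0) + (row[i] if i < len(row) else 0)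
--                 for i in range(max(len(sums), len(row)))]
--     vals = sorted(sums)
--     for a, b in zip(vals, vals[1:]):
--         if a == b:
--             return True
--     return False
-- ===== Notes on version B (the rewrite author's own statement) =====
-- stated objective: alternative
-- what changed: Replaces the dict-of-column-sums plus repeated list(values()).count scan with a padded element-wise list merge and a sort-then-adjacent-compare duplicate check.
import Mathlib
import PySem

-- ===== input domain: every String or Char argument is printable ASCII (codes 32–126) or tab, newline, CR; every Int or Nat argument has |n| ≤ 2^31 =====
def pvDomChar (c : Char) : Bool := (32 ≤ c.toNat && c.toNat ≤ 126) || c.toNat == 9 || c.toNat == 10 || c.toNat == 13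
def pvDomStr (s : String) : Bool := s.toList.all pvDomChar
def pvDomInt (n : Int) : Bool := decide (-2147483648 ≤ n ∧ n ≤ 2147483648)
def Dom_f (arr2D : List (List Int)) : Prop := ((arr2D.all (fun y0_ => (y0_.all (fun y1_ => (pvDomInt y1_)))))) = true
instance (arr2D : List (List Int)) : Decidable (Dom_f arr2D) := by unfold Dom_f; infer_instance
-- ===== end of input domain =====

-- B replaces the dict + repeated values().count scan with a padded list merge and a
-- sort-then-adjacent-compare duplicate check.

-- ===== PORT A =====
def f (arr2D : List (List Int)) : Bool :=
  let d : PySem.Dict Int Int := arr2D.foldl (fun d row =>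
    (PySem.List.enumerate row).foldl (fun d p =>
      if d.contains p.1 then d.insert p.1 (d.getD p.1 0 + p.2)
      else d.insert p.1 p.2) d) PySem.Dict.empty
  let vs := d.values
  vs.any (fun s => 2 ≤ vs.count s)

-- ===== PORT B =====
-- the per-row list comprehension of Source B
def mergeRow (sums row : List Int) : List Int :=
  (List.range (max sums.length row.length)).map
    (fun i => sums.getD i 0 + row.getD i 0)

-- the 'for a, b in zip(vals, vals[1:])' early-return loop of Source B
def adjEq : List Int → Bool
  | a :: b :: rest => if a == b then true else adjEq (b :: rest)
  | _ => false

def f_alt (arr2D : List (List Int)) : Bool :=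
  adjEq (PySem.List.sorted (arr2D.foldl mergeRow []) (fun x => x) false)

-- ===== PRECONDITION & SPEC =====
def Spec_f (arr2D : List (List Int)) (out : Bool) : Prop := out = f_alt arr2D
instance (arr2D : List (List Int)) (out : Bool) : Decidable (Spec_f arr2D out) := by unfold Spec_f; infer_instance

-- ===== CLAIM (what is proved, stated in full; the proofs are below) =====
def Claim_equal_f : Prop := ∀ (arr2D : List (List Int)), Dom_f arr2D → Spec_f arr2D (f arr2D)

-- ===== LEMMAS AND PROOFS =====

-- the dict holding s as column sums: keys 0,1,2,… in order
def dictOf (s : List Int) : PySem.Dict Int Int := PySem.Dict.mk (PySem.List.enumerate s)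

theorem mergeRow_nil_right (s : List Int) : mergeRow s [] = s := by
  unfold mergeRow
  apply List.ext_getElem
  · simp
  · intro i h1 h2
    simp [List.getElem?_eq_getElem h2]

theorem mergeRow_nil_left (r : List Int) : mergeRow [] r = r := by
  unfold mergeRow
  apply List.ext_getElem
  · simp
  · intro i h1 h2
    simp [List.getElem?_eq_getElem h2]

theorem mergeRow_cons (a b : Int) (s r : List Int) :
    mergeRow (a :: s) (b :: r) = (a + b) :: mergeRow s r := by
  unfold mergeRow
  simp [Nat.succ_max_succ, List.range_succ_eq_map, List.map_map, Function.comp_def]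

theorem items_dictOf (s : List Int) : (dictOf s).items = PySem.List.enumerate s := rfl

theorem nodup_keys_dictOf (s : List Int) : (dictOf s).keys.Nodup := by
  have h := PySem.List.pairwise_lt_enumerate (xs := s) (s := 0)
  simp only [PySem.Dict.keys, items_dictOf]
  exact List.pairwise_map.mpr (h.imp fun hlt => ne_of_lt hlt)

theorem mem_keys_dictOf (s : List Int) (k : Int) :
    k ∈ (dictOf s).keys ↔ 0 ≤ k ∧ k < s.length := by
  simp only [PySem.Dict.keys, items_dictOf, List.mem_map]
  constructor
  · rintro ⟨p, hp, rfl⟩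
    obtain ⟨n, hn, rfl⟩ := (PySem.List.mem_enumerate_iff _ _ _).mp hp
    simp only [zero_add]
    constructor <;> [positivity; exact_mod_cast hn]
  · rintro ⟨h0, h1⟩
    refine ⟨(k, s[k.toNat]'(by omega)), (PySem.List.mem_enumerate_iff _ _ _).mpr
      ⟨k.toNat, by omega, ?_⟩, rfl⟩
    rw [Prod.mk.injEq]
    exact ⟨by omega, rfl⟩

theorem contains_dictOf (s : List Int) (k : Int) :
    (dictOf s).contains k = decide (0 ≤ k ∧ k < s.length) := by
  rw [PySem.Dict.contains_eq_decide_mem_keys]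
  exact decide_eq_decide.mpr (mem_keys_dictOf s k)

theorem getD_dictOf (pre suf : List Int) (c : Int) :
    (dictOf (pre ++ c :: suf)).getD (pre.length : Int) 0 = c := by
  refine PySem.Dict.getD_of_mem_items _ ?_ (nodup_keys_dictOf _) 0
  rw [items_dictOf]
  refine (PySem.List.mem_enumerate_iff _ _ _).mpr ⟨pre.length, by simp, ?_⟩
  rw [Prod.mk.injEq]
  refine ⟨by omega, ?_⟩
  rw [List.getElem_append_right (by omega)]
  simp

theorem map_id_of_mem {α : Type} (l : List α) (g : α → α) (h : ∀ p ∈ l, g p = p) :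
    l.map g = l := by
  rw [List.map_congr_left h]
  simp

-- replacing the value at key |pre| in dictOf (pre ++ c :: suf)
theorem insert_dictOf_mid (pre suf : List Int) (c w : Int) :
    (dictOf (pre ++ c :: suf)).insert (pre.length : Int) w
      = dictOf (pre ++ w :: suf) := by
  apply PySem.Dict.ext
  rw [PySem.Dict.items_insert_of_contains _ w (by rw [contains_dictOf]; simp)]
  rw [items_dictOf, items_dictOf]
  rw [PySem.List.enumerate_append, PySem.List.enumerate_append,
      PySem.List.enumerate_cons, PySem.List.enumerate_cons]
  rw [List.map_append, List.map_cons]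
  congr 1
  · apply map_id_of_mem
    intro p hp
    obtain ⟨n, hn, rfl⟩ := (PySem.List.mem_enumerate_iff _ _ _).mp hp
    simp only [beq_iff_eq, ite_eq_right_iff]
    intro h
    exfalso
    simp only [zero_add] at h
    omega
  · congr 1
    · simp
    · apply map_id_of_mem
      intro p hp
      obtain ⟨n, hn, rfl⟩ := (PySem.List.mem_enumerate_iff _ _ _).mp hp
      simp only [beq_iff_eq, ite_eq_right_iff]
      intro h
      exfalso
      omega

theorem insert_dictOf_end (pre : List Int) (w : Int) :
    (dictOf pre).insert (pre.length : Int) w = dictOf (pre ++ [w]) := by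
  apply PySem.Dict.ext
  rw [PySem.Dict.items_insert_of_not_contains _ w (by rw [contains_dictOf]; simp)]
  rw [items_dictOf, items_dictOf, PySem.List.enumerate_append]
  simp [PySem.List.enumerate_cons, PySem.List.enumerate_nil]

-- the inner loop of A over one row, from an arbitrary split of the current sums
theorem inner_loop (row : List Int) (pre suf : List Int) :
    (PySem.List.enumerate row (pre.length : Int)).foldl (fun d p =>
        if d.contains p.1 then d.insert p.1 (d.getD p.1 0 + p.2)
        else d.insert p.1 p.2) (dictOf (pre ++ suf))
      = dictOf (pre ++ mergeRow suf row) := by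
  induction row generalizing pre suf with
  | nil => simp [PySem.List.enumerate_nil, mergeRow_nil_right]
  | cons v vs ih =>
    rw [PySem.List.enumerate_cons, List.foldl_cons]
    cases suf with
    | nil =>
      rw [show (dictOf (pre ++ [])).contains (pre.length : Int) = false by
            rw [contains_dictOf]; simp]
      simp only [Bool.false_eq_true, if_false]
      have h1 : (dictOf (pre ++ [])).insert (pre.length : Int) v = dictOf (pre ++ [v]) := by
        rw [List.append_nil]; exact insert_dictOf_end pre v
      rw [h1]
      have h2 := ih (pre ++ [v]) []
      rw [List.append_nil, mergeRow_nil_left] at h2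
      rw [mergeRow_nil_left]
      rw [show (pre.length : Int) + 1 = (((pre ++ [v]).length : Nat) : Int) by simp]
      rw [h2, List.append_assoc]
      rfl
    | cons c suf' =>
      rw [show (dictOf (pre ++ c :: suf')).contains (pre.length : Int) = true by
            rw [contains_dictOf]; simp]
      simp only [if_true]
      rw [getD_dictOf, insert_dictOf_mid, mergeRow_cons]
      have h2 := ih (pre ++ [c + v]) suf'
      rw [List.append_assoc, List.append_assoc] at h2
      simp only [List.singleton_append] at h2
      rw [show (pre.length : Int) + 1 = (((pre ++ [c + v]).length : Nat) : Int) by simp]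
      rw [h2]

theorem outer_loop (arr2D : List (List Int)) (s : List Int) :
    arr2D.foldl (fun d row =>
        (PySem.List.enumerate row).foldl (fun d p =>
          if d.contains p.1 then d.insert p.1 (d.getD p.1 0 + p.2)
          else d.insert p.1 p.2) d) (dictOf s)
      = dictOf (arr2D.foldl mergeRow s) := by
  induction arr2D generalizing s with
  | nil => rfl
  | cons row rest ih =>
    rw [List.foldl_cons, List.foldl_cons]
    have h := inner_loop row [] s
    simp only [List.length_nil, List.nil_append, Nat.cast_zero] at h
    rw [h]
    exact ih (mergeRow s row)

theorem values_dictOf (s : List Int) : (dictOf s).values = s := by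
  simp only [PySem.Dict.values, items_dictOf]
  exact PySem.List.map_snd_enumerate s 0

theorem adjEq_iff_not_chain (l : List Int) :
    adjEq l = true ↔ ¬ l.IsChain (· ≠ ·) := by
  induction l with
  | nil => simp [adjEq]
  | cons a t ih =>
    cases t with
    | nil => simp [adjEq]
    | cons b r =>
      rw [List.isChain_cons_cons]
      by_cases h : a = b
      · simp [adjEq, h]
      · simp only [adjEq, beq_iff_eq, h, if_false, ih]
        tauto

-- duplicate check on vs via counts  =  adjacent-equal check on sorted vs
theorem dup_check_eq (vs : List Int) :
    (vs.any (fun s => 2 ≤ vs.count s))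
      = adjEq (PySem.List.sorted vs (fun x => x) false) := by
  have hperm : (PySem.List.sorted vs (fun x => x) false).Perm vs :=
    PySem.List.sorted_perm vs (fun x => x) false
  have hpw : (PySem.List.sorted vs (fun x => x) false).Pairwise (· ≤ ·) :=
    PySem.List.sorted_pairwise vs (fun x => x)
  by_cases hnd : vs.Nodup
  · have hnds : (PySem.List.sorted vs (fun x => x) false).Nodup := hperm.nodup_iff.mpr hnd
    have ha : vs.any (fun s => 2 ≤ vs.count s) = false := by
      apply Bool.eq_false_iff.mpr
      intro h
      obtain ⟨x, hx, hc⟩ := List.any_eq_true.mp h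
      have := List.nodup_iff_count_le_one.mp hnd x
      simp only [decide_eq_true_eq] at hc
      omega
    have hb : adjEq (PySem.List.sorted vs (fun x => x) false) = false := by
      apply Bool.eq_false_iff.mpr
      intro h
      exact (adjEq_iff_not_chain _).mp h (List.Pairwise.isChain hnds)
    rw [ha, hb]
  · have hx : ∃ x ∈ vs, 2 ≤ vs.count x := by
      by_contra hno
      push Not at hno
      refine hnd (List.nodup_iff_count_le_one.mpr fun x => ?_)
      by_cases hm : x ∈ vs
      · have := hno x hm; omega
      · rw [List.count_eq_zero_of_not_mem hm]; omega
    obtain ⟨x, hxm, hxc⟩ := hx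
    have h1 : vs.any (fun s => 2 ≤ vs.count s) = true :=
      List.any_eq_true.mpr ⟨x, hxm, by simpa using hxc⟩
    have h2 : adjEq (PySem.List.sorted vs (fun x => x) false) = true := by
      rw [adjEq_iff_not_chain]
      intro hch
      have hnds : (PySem.List.sorted vs (fun x => x) false).Nodup := by
        have hadj : (PySem.List.sorted vs (fun x => x) false).IsChain (· ≤ ·) :=
          List.Pairwise.isChain hpw
        have hlt : (PySem.List.sorted vs (fun x => x) false).IsChain (· < ·) := by
          rw [List.isChain_iff_getElem] at hadj hch ⊢
          intro i hi
          have h3 := hadj i hi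
          have h4 := hch i hi
          omega
        have hplt := (List.isChain_iff_pairwise).mp hlt
        exact hplt.imp fun h => by omega
      exact hnd (hperm.nodup_iff.mp hnds)
    rw [h1, h2]

-- ===== VERDICT (by name: the statement is the Claim_ definition above) =====
theorem f_spec : Claim_equal_f := by
  intro arr2D _
  unfold Spec_f f f_alt
  have h0 : (PySem.Dict.empty : PySem.Dict Int Int) = dictOf [] := rfl
  simp only [h0, outer_loop, values_dictOf]
  exact dup_check_eq _
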